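-- pv_equiv track=rewrite | github.com/pypi-data/pypi-mirror-402 | packages/genshin-impact/genshin_impact-0.1.3.dev1-py3-none-any.whl/LibTest.py | simulate_show_ascension_mats
-- ===== SOURCE A (Python) =====
-- def simulate_show_ascension_mats(data):
--     ascension_levels_data = data.get('ascension_levels', {})
--     materials_by_ascension_level = {
--         "A1": [], "A2": [], "A3": [], "A4": [], "A5": [], "A6": []
--     }
--     total_materials = {}
--
--     if not ascension_levels_data:
--         return materials_by_ascension_level, total_materials
--
--     for material_name, levels in ascension_levels_data.items():
--         for level_key, level_info in levels.items():
--             if level_key in materials_by_ascension_level: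
--                 materials_by_ascension_level[level_key].append(
--                     f"{level_info.get('amount', 'N/A')}x {material_name}"
--                 )
--                 # [LOGIC BLOCK] Accumulate Total Materials
--                 # This logic calculates the running total amount for each unique material.
--                 current_amount = level_info.get('amount', 0)
--                 total_materials[material_name] = total_materials.get(material_name, 0) + current_amount
--
--     return materials_by_ascension_level, total_materials
-- ===== SOURCE B (Python) =====
-- _VALID = ("A1", "A2", "A3", "A4", "A5", "A6")
--
-- def simulate_show_ascension_mats(data):
--     ascension_levels_data = data.get('ascension_levels', {})
--     entries = [(name, level_key, level_info)
--                for name, levels in ascension_levels_data.items()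
--                for level_key, level_info in levels.items()
--                if level_key in _VALID]
--     materials_by_ascension_level = {
--         k: [f"{info.get('amount', 'N/A')}x {name}"
--             for name, lk, info in entries if lk == k]
--         for k in _VALID
--     }
--     total_materials = {}
--     for name, _lk, info in entries:
--         total_materials[name] = total_materials.get(name, 0) + info.get('amount', 0)
--     return materials_by_ascension_level, total_materials
-- ===== Notes on version B (the rewrite author's own statement) =====
-- stated objective: alternative
-- what changed: Replaces A's single interleaved loop that mutates two dicts in lockstep with a flatten-then-group pipeline: one comprehension flattens the nested dicts into a filtered list of (material, level, info) entries, the level lists are then built per-key by a dict comprehension over that flat list, and totals by one flat accumulation loop.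
import Mathlib
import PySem

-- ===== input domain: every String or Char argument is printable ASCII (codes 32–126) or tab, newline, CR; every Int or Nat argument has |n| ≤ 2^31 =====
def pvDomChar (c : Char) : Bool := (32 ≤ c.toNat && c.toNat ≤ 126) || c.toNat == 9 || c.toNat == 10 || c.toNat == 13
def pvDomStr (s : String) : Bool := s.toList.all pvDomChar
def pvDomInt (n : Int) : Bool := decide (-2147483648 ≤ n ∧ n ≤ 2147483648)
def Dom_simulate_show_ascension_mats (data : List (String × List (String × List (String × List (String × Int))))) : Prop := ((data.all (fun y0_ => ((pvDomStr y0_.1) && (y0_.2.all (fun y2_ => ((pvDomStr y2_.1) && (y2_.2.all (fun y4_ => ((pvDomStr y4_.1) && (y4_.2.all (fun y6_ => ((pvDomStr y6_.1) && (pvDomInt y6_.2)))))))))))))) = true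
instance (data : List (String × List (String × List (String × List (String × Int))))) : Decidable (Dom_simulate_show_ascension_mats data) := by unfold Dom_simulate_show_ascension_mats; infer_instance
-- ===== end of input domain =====

-- B restructures A's single interleaved two-dict loop into a flatten-then-group pipeline
-- (one flat filtered entry list, per-level-key grouping, one flat totals loop); alternative
-- decomposition, same asymptotic cost; the equivalence is about the return value only.

-- ===== PORT A =====
-- f"{level_info.get('amount', 'N/A')}x {material_name}"
def pvLabelA (info : List (String × Int)) (name : String) : String :=
  (match PySem.Dict.get? (PySem.Dict.mk info) "amount" with
   | some a => PySem.Int.toStr a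
   | none => "N/A") ++ "x " ++ name

def simulate_show_ascension_mats (data : List (String × List (String × List (String × List (String × Int))))) : (List (String × List String)) × (List (String × Int)) :=
  let ascension_levels_data := PySem.Dict.getD (PySem.Dict.mk data) "ascension_levels" []
  let mbal0 : PySem.Dict String (List String) :=
    PySem.Dict.mk [("A1", []), ("A2", []), ("A3", []), ("A4", []), ("A5", []), ("A6", [])]
  let tot0 : PySem.Dict String Int := PySem.Dict.empty
  if ascension_levels_data.isEmpty then (mbal0.items, tot0.items)
  else
    let fin := ascension_levels_data.foldl
      (fun (st : PySem.Dict String (List String) × PySem.Dict String Int) p =>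
        p.2.foldl (fun st q =>
          if st.1.contains q.1 then
            (st.1.modify q.1 [] (fun l => l ++ [pvLabelA q.2 p.1]),
             st.2.insert p.1 (st.2.getD p.1 0 + PySem.Dict.getD (PySem.Dict.mk q.2) "amount" 0))
          else st) st)
      (mbal0, tot0)
    (fin.1.items, fin.2.items)

-- ===== PORT B =====
def pvValidB : List String := ["A1", "A2", "A3", "A4", "A5", "A6"]

-- f"{info.get('amount', 'N/A')}x {name}"
def pvLabelB (info : List (String × Int)) (name : String) : String :=
  (match PySem.Dict.get? (PySem.Dict.mk info) "amount" with
   | some a => PySem.Int.toStr a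
   | none => "N/A") ++ "x " ++ name

def simulate_show_ascension_mats_alt (data : List (String × List (String × List (String × List (String × Int))))) : (List (String × List String)) × (List (String × Int)) :=
  let ald := PySem.Dict.getD (PySem.Dict.mk data) "ascension_levels" []
  let entries := ald.flatMap
    (fun p => (p.2.filter (fun q => pvValidB.contains q.1)).map (fun q => (p.1, q.1, q.2)))
  let mbal := pvValidB.map
    (fun k => (k, (entries.filter (fun e => e.2.1 == k)).map (fun e => pvLabelB e.2.2 e.1)))
  let tot := entries.foldl
    (fun (t : PySem.Dict String Int) e =>
      t.insert e.1 (t.getD e.1 0 + PySem.Dict.getD (PySem.Dict.mk e.2.2) "amount" 0))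
    PySem.Dict.empty
  (mbal, tot.items)

-- ===== PRECONDITION & SPEC =====
def Spec_simulate_show_ascension_mats (data : List (String × List (String × List (String × List (String × Int))))) (out : (List (String × List String)) × (List (String × Int))) : Prop := out = simulate_show_ascension_mats_alt data
instance (data : List (String × List (String × List (String × List (String × Int))))) (out : (List (String × List String)) × (List (String × Int))) : Decidable (Spec_simulate_show_ascension_mats data out) := by unfold Spec_simulate_show_ascension_mats; infer_instance

-- ===== CLAIM (what is proved, stated in full; the proofs are below) =====
def Claim_equal_simulate_show_ascension_mats : Prop := ∀ (data : List (String × List (String × List (String × List (String × Int))))), Dom_simulate_show_ascension_mats data → Spec_simulate_show_ascension_mats data (simulate_show_ascension_mats data)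

-- ===== LEMMAS AND PROOFS =====

-- the two label helpers compute the same string
lemma pvLabel_eq : pvLabelA = pvLabelB := rfl

-- entries contributed by one material (B's inner comprehension step)
def pvEnt (p : String × List (String × List (String × Int))) : List (String × String × List (String × Int)) :=
  (p.2.filter (fun q => pvValidB.contains q.1)).map (fun q => (p.1, q.1, q.2))

-- B's grouping/total steps over the flat entry list
def pvMStep (m : PySem.Dict String (List String)) (e : String × String × List (String × Int)) : PySem.Dict String (List String) :=
  m.modify e.2.1 [] (fun l => l ++ [pvLabelB e.2.2 e.1])

def pvTStep (t : PySem.Dict String Int) (e : String × String × List (String × Int)) : PySem.Dict String Int :=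
  t.insert e.1 (t.getD e.1 0 + PySem.Dict.getD (PySem.Dict.mk e.2.2) "amount" 0)

-- A's interleaved inner loop over one material's levels = B's two folds over that material's entries
lemma pv_inner (name : String) (levels : List (String × List (String × Int)))
    (m : PySem.Dict String (List String)) (t : PySem.Dict String Int)
    (hm : m.keys = pvValidB) :
    levels.foldl (fun (st : PySem.Dict String (List String) × PySem.Dict String Int) q =>
        if st.1.contains q.1 then
          (st.1.modify q.1 [] (fun l => l ++ [pvLabelA q.2 name]),
           st.2.insert name (st.2.getD name 0 + PySem.Dict.getD (PySem.Dict.mk q.2) "amount" 0))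
        else st) (m, t)
      = ((pvEnt (name, levels)).foldl pvMStep m, (pvEnt (name, levels)).foldl pvTStep t)
      ∧ ((pvEnt (name, levels)).foldl pvMStep m).keys = pvValidB := by
  induction levels generalizing m t with
  | nil => simpa [pvEnt] using hm
  | cons q ls ih =>
    have hc : m.contains q.1 = pvValidB.contains q.1 := by
      rw [PySem.Dict.contains_eq_decide_mem_keys, hm]; simp
    by_cases hmem : q.1 ∈ pvValidB
    · have hct : m.contains q.1 = true := by
        rw [hc]; exact List.contains_iff_mem.mpr hmem
      have hkeys : (m.modify q.1 [] (fun l => l ++ [pvLabelB q.2 name])).keys = pvValidB := by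
        rw [PySem.Dict.keys_modify, PySem.Dict.keys_insert_of_contains _ _ hct, hm]
      have hent : pvEnt (name, q :: ls) = (name, q.1, q.2) :: pvEnt (name, ls) := by
        simp [pvEnt, hmem]
      rw [hent, List.foldl_cons, List.foldl_cons, List.foldl_cons]
      simp only [hct, if_pos, pvLabel_eq]
      exact ih _ _ hkeys
    · have hcf : m.contains q.1 = false := by
        rw [hc]; simpa using hmem
      have hent : pvEnt (name, q :: ls) = pvEnt (name, ls) := by
        simp [pvEnt, hmem]
      rw [hent, List.foldl_cons]
      simp only [hcf, Bool.false_eq_true, if_false]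
      exact ih m t hm

-- A's whole interleaved loop = B's two folds over the flat entry list
lemma pv_outer (ald : List (String × List (String × List (String × Int))))
    (m : PySem.Dict String (List String)) (t : PySem.Dict String Int)
    (hm : m.keys = pvValidB) :
    ald.foldl (fun (st : PySem.Dict String (List String) × PySem.Dict String Int) p =>
        p.2.foldl (fun st q =>
          if st.1.contains q.1 then
            (st.1.modify q.1 [] (fun l => l ++ [pvLabelA q.2 p.1]),
             st.2.insert p.1 (st.2.getD p.1 0 + PySem.Dict.getD (PySem.Dict.mk q.2) "amount" 0))
          else st) st) (m, t)
      = ((ald.flatMap pvEnt).foldl pvMStep m, (ald.flatMap pvEnt).foldl pvTStep t)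
      ∧ ((ald.flatMap pvEnt).foldl pvMStep m).keys = pvValidB := by
  induction ald generalizing m t with
  | nil => simpa using hm
  | cons p ps ih =>
    obtain ⟨h1, hk1⟩ := pv_inner p.1 p.2 m t hm
    rw [List.foldl_cons, h1]
    obtain ⟨h2, hk2⟩ := ih _ _ hk1
    rw [List.flatMap_cons, List.foldl_append, List.foldl_append, h2, hk2]
    exact ⟨rfl, rfl⟩

-- every value stored in A's initial six-key dict is [], so every lookup with default [] is []
lemma pv_mbal0_getD (k : String) :
    (PySem.Dict.mk [("A1", ([] : List String)), ("A2", []), ("A3", []), ("A4", []), ("A5", []), ("A6", [])]).getD k [] = [] := by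
  simp only [PySem.Dict.getD_eq_get?_getD, PySem.Dict.get?_mk_cons]
  split_ifs <;> rfl

-- the whole body of A (on the extracted 'ascension_levels' value) equals the body of B
lemma pv_main (ald : List (String × List (String × List (String × Int)))) :
    (if ald.isEmpty then
      ((PySem.Dict.mk [("A1", ([] : List String)), ("A2", []), ("A3", []), ("A4", []), ("A5", []), ("A6", [])]).items,
       (PySem.Dict.empty : PySem.Dict String Int).items)
     else
      ((ald.foldl (fun (st : PySem.Dict String (List String) × PySem.Dict String Int) p =>
          p.2.foldl (fun st q =>
            if st.1.contains q.1 then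
              (st.1.modify q.1 [] (fun l => l ++ [pvLabelA q.2 p.1]),
               st.2.insert p.1 (st.2.getD p.1 0 + PySem.Dict.getD (PySem.Dict.mk q.2) "amount" 0))
            else st) st)
          (PySem.Dict.mk [("A1", []), ("A2", []), ("A3", []), ("A4", []), ("A5", []), ("A6", [])], PySem.Dict.empty)).1.items,
       (ald.foldl (fun (st : PySem.Dict String (List String) × PySem.Dict String Int) p =>
          p.2.foldl (fun st q =>
            if st.1.contains q.1 then
              (st.1.modify q.1 [] (fun l => l ++ [pvLabelA q.2 p.1]),
               st.2.insert p.1 (st.2.getD p.1 0 + PySem.Dict.getD (PySem.Dict.mk q.2) "amount" 0))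
            else st) st)
          (PySem.Dict.mk [("A1", []), ("A2", []), ("A3", []), ("A4", []), ("A5", []), ("A6", [])], PySem.Dict.empty)).2.items))
    = (pvValidB.map (fun k => (k, ((ald.flatMap pvEnt).filter (fun e => e.2.1 == k)).map (fun e => pvLabelB e.2.2 e.1))),
       ((ald.flatMap pvEnt).foldl pvTStep PySem.Dict.empty).items) := by
  by_cases h : ald.isEmpty
  · have hnil : ald = [] := List.isEmpty_iff.mp h
    subst hnil
    rfl
  · rw [if_neg (by simpa using h)]
    obtain ⟨heq, hkeys⟩ := pv_outer ald
      (PySem.Dict.mk [("A1", []), ("A2", []), ("A3", []), ("A4", []), ("A5", []), ("A6", [])])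
      PySem.Dict.empty (by rfl)
    rw [heq]
    refine Prod.ext ?_ rfl
    dsimp only
    have hnd : ((ald.flatMap pvEnt).foldl pvMStep
        (PySem.Dict.mk [("A1", []), ("A2", []), ("A3", []), ("A4", []), ("A5", []), ("A6", [])])).keys.Nodup := by
      rw [hkeys]; decide
    rw [PySem.Dict.items_eq_map_keys _ hnd ([] : List String), hkeys]
    apply List.map_congr_left
    intro k _
    have hfold : (ald.flatMap pvEnt).foldl pvMStep
          (PySem.Dict.mk [("A1", []), ("A2", []), ("A3", []), ("A4", []), ("A5", []), ("A6", [])])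
        = ((ald.flatMap pvEnt).map (fun e => (e.2.1, pvLabelB e.2.2 e.1))).foldl
            (fun d p => d.modify p.1 [] (fun l => l ++ [p.2]))
            (PySem.Dict.mk [("A1", []), ("A2", []), ("A3", []), ("A4", []), ("A5", []), ("A6", [])]) := by
      rw [List.foldl_map]; rfl
    rw [hfold, PySem.Dict.getD_foldl_modify_append, pv_mbal0_getD, List.filter_map, List.map_map]
    rfl

-- ===== VERDICT (by name: the statement is the Claim_ definition above) =====
theorem simulate_show_ascension_mats_spec : Claim_equal_simulate_show_ascension_mats := by
  intro data _
  exact pv_main (PySem.Dict.getD (PySem.Dict.mk data) "ascension_levels" [])
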